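-- pv_equiv track=rewrite | github.com/PalakTiwary1394/ShopHopper | Compare_color.py | filter_color
-- ===== SOURCE A (Python) =====
-- def filter_color(str):
--     temp = ''
--     output = []
--     p = 0
--     while p < len(str):
--         if str[p] == '#':
--             temp += str[p: p+7]
--             p = p + 7
--
--             output.append(temp)
--             temp = ''
--         else:
--             p = p + 1
--
--     return output
-- ===== SOURCE B (Python) =====
-- def filter_color(str):
--     output = []
--     last = -7
--     for i, c in enumerate(str):
--         if c == '#' and i - last >= 7:
--             output.append(str[i:i + 7])
--             last = i
--     return output
-- ===== Notes on version B (the rewrite author's own statement) =====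
-- stated objective: idiomatic
-- what changed: Replaces the while-loop with a jumping index pointer and a temp accumulator by a single for-each pass over enumerate(str) that maintains the index of the last accepted '#' and slices only when the current '#' is at least 7 characters past it.
import Mathlib
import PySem

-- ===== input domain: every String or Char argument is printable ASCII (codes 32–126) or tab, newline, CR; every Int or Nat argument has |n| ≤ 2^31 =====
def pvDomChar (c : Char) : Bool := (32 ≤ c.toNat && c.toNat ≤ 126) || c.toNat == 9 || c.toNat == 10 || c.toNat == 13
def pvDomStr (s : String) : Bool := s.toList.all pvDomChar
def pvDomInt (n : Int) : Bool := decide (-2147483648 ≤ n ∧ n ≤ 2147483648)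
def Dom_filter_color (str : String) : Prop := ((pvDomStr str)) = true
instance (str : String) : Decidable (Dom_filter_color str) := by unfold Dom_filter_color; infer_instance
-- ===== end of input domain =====

-- B replaces A's jumping-pointer while-loop by a single for-each pass over enumerate that
-- remembers the index of the last accepted '#'; same values, alternative structure.

-- ===== PORT A =====
-- while p < len(str): if str[p] == '#': temp += str[p:p+7]; p += 7; output.append(temp); temp = '' else p += 1
def filterColorLoopA (s : List Char) (p : Nat) (temp : List Char) (out : List String) : List String :=
  if _h : p < s.length then
    if PySem.List.pyGet? s (p : Int) = some '#' then
      filterColorLoopA s (p + 7) []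
        (out ++ [String.ofList (temp ++ PySem.List.slice s (some (p : Int)) (some ((p : Int) + 7)))])
    else filterColorLoopA s (p + 1) temp out
  else out
termination_by s.length - p

def filter_color (str : String) : List String :=
  filterColorLoopA str.toList 0 [] []

-- ===== PORT B =====
-- for i, c in enumerate(str): if c == '#' and i - last >= 7: append str[i:i+7]; last = i
def stepB (s : List Char) (acc : List String × Int) (ic : Int × Char) : List String × Int :=
  if ic.2 = '#' ∧ ic.1 - acc.2 ≥ 7 then
    (acc.1 ++ [String.ofList (PySem.List.slice s (some ic.1) (some (ic.1 + 7)))], ic.1)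
  else acc

def filter_color_alt (str : String) : List String :=
  ((PySem.List.enumerate str.toList 0).foldl (stepB str.toList) ([], -7)).1

-- ===== PRECONDITION & SPEC =====
def Spec_filter_color (str : String) (out : List String) : Prop := out = filter_color_alt str
instance (str : String) (out : List String) : Decidable (Spec_filter_color str out) := by unfold Spec_filter_color; infer_instance

-- ===== CLAIM (what is proved, stated in full; the proofs are below) =====
def Claim_equal_filter_color : Prop := ∀ (str : String), Dom_filter_color str → Spec_filter_color str (filter_color str)

-- ===== LEMMAS AND PROOFS =====

-- the slice str[p:p+7] is drop-then-take
theorem slice_seven (l : List Char) (p : Nat) :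
    PySem.List.slice l (some (p : Int)) (some ((p : Int) + 7)) = (l.drop p).take 7 := by
  have h7 : ((p : Int) + 7) = (((p + 7 : Nat) : Int)) := by push_cast; ring
  rw [h7, PySem.List.slice_natCast]
  congr 1
  omega

-- entries with index i < last + 7 are skipped by stepB
theorem skip_aux (l : List Char) :
    ∀ (k m : Nat) (out : List String) (last : Int), (m : Int) + k ≤ last + 7 →
      ((PySem.List.enumerate l 0).drop m).foldl (stepB l) (out, last)
        = ((PySem.List.enumerate l 0).drop (m + k)).foldl (stepB l) (out, last) := by
  intro k
  induction k with
  | zero => intro m out last _; rfl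
  | succ k ih =>
    intro m out last hle
    by_cases hm : m < l.length
    · have hm' : m < (PySem.List.enumerate l 0).length := by
        simpa [PySem.List.length_enumerate] using hm
      rw [List.drop_eq_getElem_cons hm']
      have he : (PySem.List.enumerate l 0)[m] = ((m : Int), l[m]) := by
        simp [PySem.List.getElem_enumerate]
      rw [he, List.foldl_cons]
      have hstep : stepB l (out, last) ((m : Int), l[m]) = (out, last) := by
        unfold stepB
        rw [if_neg]
        rintro ⟨_, hge⟩
        simp only at hge
        omega
      rw [hstep]
      have := ih (m + 1) out last (by push_cast; push_cast at hle; omega)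
      simpa [Nat.add_comm, Nat.add_left_comm, Nat.add_assoc] using this
    · have hlen : (PySem.List.enumerate l 0).length ≤ m := by
        simp [PySem.List.length_enumerate]; omega
      rw [List.drop_eq_nil_of_le hlen, List.drop_eq_nil_of_le (by omega)]

-- main invariant: B's fold over the tail from position p, with last at least 7 behind p,
-- computes exactly what A's loop computes from position p with empty temp
theorem main_inv (l : List Char) :
    ∀ (n p : Nat) (out : List String) (last : Int), l.length - p ≤ n → last + 7 ≤ (p : Int) →
      (((PySem.List.enumerate l 0).drop p).foldl (stepB l) (out, last)).1
        = filterColorLoopA l p [] out := by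
  intro n
  induction n with
  | zero =>
    intro p out last hn _
    have hp : l.length ≤ p := by omega
    rw [List.drop_eq_nil_of_le (by simp [PySem.List.length_enumerate]; omega)]
    rw [filterColorLoopA]
    simp [Nat.not_lt.mpr hp]
  | succ n ih =>
    intro p out last hn hlast
    by_cases hp : p < l.length
    · have hp' : p < (PySem.List.enumerate l 0).length := by
        simpa [PySem.List.length_enumerate] using hp
      rw [List.drop_eq_getElem_cons hp']
      have he : (PySem.List.enumerate l 0)[p] = ((p : Int), l[p]) := by
        simp [PySem.List.getElem_enumerate]
      rw [he, List.foldl_cons]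
      by_cases hc : l[p] = '#'
      · have hstep : stepB l (out, last) ((p : Int), l[p])
            = (out ++ [String.ofList ((l.drop p).take 7)], (p : Int)) := by
          unfold stepB
          rw [if_pos ⟨hc, by simp only; omega⟩]
          simp [slice_seven]
        rw [hstep]
        have hskip := skip_aux l 6 (p + 1) (out ++ [String.ofList ((l.drop p).take 7)]) (p : Int)
          (by push_cast; omega)
        rw [hskip]
        have hrec := ih (p + 7) (out ++ [String.ofList ((l.drop p).take 7)]) (p : Int)
          (by omega) (by push_cast; omega)
        rw [show p + 1 + 6 = p + 7 by omega, hrec]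
        conv_rhs => rw [filterColorLoopA]
        simp [hp, hc, slice_seven]
      · have hstep : stepB l (out, last) ((p : Int), l[p]) = (out, last) := by
          unfold stepB
          rw [if_neg]
          rintro ⟨h1, _⟩
          exact hc h1
        rw [hstep]
        have hrec := ih (p + 1) out last (by omega) (by push_cast; omega)
        rw [hrec]
        conv_rhs => rw [filterColorLoopA]
        simp [hp, hc]
    · have hp' : l.length ≤ p := by omega
      rw [List.drop_eq_nil_of_le (by simp [PySem.List.length_enumerate]; omega)]
      rw [filterColorLoopA]
      simp [Nat.not_lt.mpr hp']

-- ===== VERDICT (by name: the statement is the Claim_ definition above) =====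
theorem filter_color_spec : Claim_equal_filter_color := by
  intro str _
  unfold Spec_filter_color filter_color filter_color_alt
  have := main_inv str.toList str.toList.length 0 [] (-7) (by omega) (by norm_num)
  simpa using this.symm
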